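-- pv_equiv track=rewrite | github.com/gnsoares/UNICAMP_MC102_ProgrammingIntro | lab16/lab16.py | linksResposta
-- ===== SOURCE A (Python) =====
-- def linksResposta(links,resp):
-- 	lR = []
-- 	# Para cada pagina o valor da resposta e checado:
-- 	# 	Se for 0, recebe -1 links
-- 	#	Se nao for 0, e feita a contagem de links de paginas com resposta diferente de 0
-- 	for i in range(len(resp)):
-- 		if resp[i] == 0:
-- 			lR.append(-1)
-- 		else:
-- 			total = 0
-- 			for j in range(len(resp)):
-- 				if resp[j] != 0:
-- 					total += links[j][i]
-- 			lR.append(total)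
-- 	return [_ for _ in lR]
-- ===== SOURCE B (Python) =====
-- def linksResposta(links, resp):
--     # Slice out the rows of pages with nonzero response, transpose that
--     # submatrix with zip(*...), and sum each column vector once.
--     rows = [links[j] for j in range(len(resp)) if resp[j] != 0]
--     sums = [sum(col) for col in zip(*rows)]
--     return [-1 if resp[i] == 0 else sums[i] for i in range(len(resp))]
-- ===== Notes on version B (the rewrite author's own statement) =====
-- stated objective: idiomatic
-- what changed: Instead of rescanning all rows per output column with a resp[j]!=0 guard on every cell, B slices out the active rows once, transposes that submatrix with zip(*rows) and maps sum over the column vectors, then emits -1/sums[i] in a final comprehension.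
import Mathlib
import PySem

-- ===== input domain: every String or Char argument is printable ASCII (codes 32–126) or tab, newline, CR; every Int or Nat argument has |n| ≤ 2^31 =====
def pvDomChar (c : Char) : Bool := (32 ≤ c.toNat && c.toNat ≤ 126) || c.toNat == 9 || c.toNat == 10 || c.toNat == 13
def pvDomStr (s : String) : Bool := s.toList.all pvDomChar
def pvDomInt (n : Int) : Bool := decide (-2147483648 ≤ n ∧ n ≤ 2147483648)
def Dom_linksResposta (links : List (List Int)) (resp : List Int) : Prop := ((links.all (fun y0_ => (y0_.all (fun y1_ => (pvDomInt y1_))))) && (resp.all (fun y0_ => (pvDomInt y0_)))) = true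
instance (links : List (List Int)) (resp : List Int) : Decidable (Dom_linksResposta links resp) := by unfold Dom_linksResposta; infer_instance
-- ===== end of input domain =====

-- B replaces A's per-column rescan of the whole matrix (guarded cell by cell) by
-- slicing out the active rows once, transposing that submatrix and summing each
-- column vector, then emitting -1/sums[i] in a final pass (idiomatic alternative).
-- Inside Pre_ every matrix access is in range, so the getD reads are exact there.

-- ===== PORT A =====
def linksResposta (links : List (List Int)) (resp : List Int) : List Int :=
  ((List.range resp.length).foldl (fun lR i =>
    if resp.getD i 0 = 0 then lR ++ [(-1 : Int)]
    else lR ++ [(List.range resp.length).foldl (fun total j =>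
      if resp.getD j 0 ≠ 0 then total + ((links.getD j []).getD i 0) else total) 0]) []).map
    (fun x => x)

-- ===== PORT B =====
-- rows = [links[j] for j in range(len(resp)) if resp[j] != 0]
def pvRowsB (links : List (List Int)) (resp : List Int) : List (List Int) :=
  ((List.range resp.length).filter (fun j => resp.getD j 0 ≠ 0)).map (fun j => links.getD j [])

-- zip(*rows): truncating transpose; stops as soon as some row is exhausted.
-- Fuel = length of the first row, an upper bound on the shortest row's length.
def pvZipStarGo : Nat → List (List Int) → List (List Int)
  | 0, _ => []
  | n + 1, rows =>
      if rows.isEmpty || rows.any (fun r => r.isEmpty) then []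
      else (rows.map (fun r => r.headD 0)) :: pvZipStarGo n (rows.map (fun r => r.tail))

def pvZipStar (rows : List (List Int)) : List (List Int) :=
  pvZipStarGo (rows.headD []).length rows

def linksResposta_alt (links : List (List Int)) (resp : List Int) : List Int :=
  let sums := (pvZipStar (pvRowsB links resp)).map List.sum
  (List.range resp.length).map
    (fun i => if resp.getD i 0 = 0 then (-1 : Int) else sums.getD i 0)

-- ===== PRECONDITION & SPEC =====
-- Pre_ excludes exactly the inputs where Python A raises IndexError: A reads
-- links[j][i] for every pair of nonzero-response indices i, j.
def Pre_linksResposta (links : List (List Int)) (resp : List Int) : Prop :=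
  ∀ i ∈ List.range resp.length, resp.getD i 0 ≠ 0 →
    ∀ j ∈ List.range resp.length, resp.getD j 0 ≠ 0 →
      j < links.length ∧ i < (links.getD j []).length
instance (links : List (List Int)) (resp : List Int) : Decidable (Pre_linksResposta links resp) := by
  unfold Pre_linksResposta; infer_instance

def pvWitness_linksResposta : List (List Int) × List Int :=
  ([[1, 2, 3], [4, 5, 6], [7, 8, 9]], [1, 0, 2])

def Spec_linksResposta (links : List (List Int)) (resp : List Int) (out : List Int) : Prop := out = linksResposta_alt links resp
instance (links : List (List Int)) (resp : List Int) (out : List Int) : Decidable (Spec_linksResposta links resp out) := by unfold Spec_linksResposta; infer_instance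

-- ===== CLAIM (what is proved, stated in full; the proofs are below) =====
def Claim_equal_linksResposta : Prop := ∀ (links : List (List Int)) (resp : List Int), Dom_linksResposta links resp → Pre_linksResposta links resp → Spec_linksResposta links resp (linksResposta links resp)

-- ===== LEMMAS AND PROOFS =====

-- guarded additive foldl = foldl over the filtered list
theorem foldl_if_filter {α : Type} (c : α → Prop) [DecidablePred c] (g : α → Int) :
    ∀ (l : List α) (s : Int),
      l.foldl (fun t j => if c j then t + g j else t) s
        = (l.filter (fun j => decide (c j))).foldl (fun t j => t + g j) s := by
  intro l
  induction l with
  | nil => intro s; simp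
  | cons x xs ih =>
      intro s
      by_cases h : c x <;> simp [List.foldl, h, ih]

-- column i of the truncating transpose, when i is in range of every row
theorem pvZipStarGo_getD :
    ∀ (fuel : Nat) (rows : List (List Int)) (i : Nat), i < fuel → rows ≠ [] →
      (∀ r ∈ rows, i < r.length) →
      (pvZipStarGo fuel rows).getD i [] = rows.map (fun r => r.getD i 0) := by
  intro fuel
  induction fuel with
  | zero => intro rows i hi; omega
  | succ n ih =>
      intro rows i hi hne hlen
      have hcond : (rows.isEmpty || rows.any (fun r => r.isEmpty)) = false := by
        simp only [Bool.or_eq_false_iff, List.isEmpty_eq_false_iff, List.any_eq_false]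
        refine ⟨hne, fun r hr => ?_⟩
        have := hlen r hr
        simp [List.isEmpty_iff]
        intro h; subst h; simp at this
      rw [pvZipStarGo, hcond]
      simp only [Bool.false_eq_true, if_false]
      cases i with
      | zero =>
          simp only [List.getD_cons_zero]
          apply List.map_congr_left
          intro r hr
          have h0 : 0 < r.length := hlen r hr
          cases r with
          | nil => simp at h0
          | cons a t => simp
      | succ i =>
          simp only [List.getD_cons_succ]
          have hne' : rows.map (fun r => r.tail) ≠ [] := by
            simpa using hne
          have hlen' : ∀ r ∈ rows.map (fun r => r.tail), i < r.length := by
            intro r hr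
            rcases List.mem_map.mp hr with ⟨r0, hr0, rfl⟩
            have := hlen r0 hr0
            simp [List.length_tail]; omega
          rw [ih (rows.map (fun r => r.tail)) i (by omega) hne' hlen']
          rw [List.map_map]
          apply List.map_congr_left
          intro r hr
          have h0 : i + 1 < r.length := hlen r hr
          cases r with
          | nil => simp at h0
          | cons a t => simp

theorem getD_map_sum (l : List (List Int)) (i : Nat) :
    (l.map List.sum).getD i 0 = (l.getD i []).sum := by
  simp only [List.getD, List.getElem?_map]
  cases h : l[i]? <;> simp

-- ===== VERDICT (by name: the statement is the Claim_ definition above) =====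
theorem linksResposta_spec : Claim_equal_linksResposta := by
  intro links resp _ hpre
  unfold Spec_linksResposta linksResposta linksResposta_alt
  have hbody : (fun (lR : List Int) (i : Nat) =>
      if resp.getD i 0 = 0 then lR ++ [(-1 : Int)]
      else lR ++ [(List.range resp.length).foldl (fun total j =>
        if resp.getD j 0 ≠ 0 then total + ((links.getD j []).getD i 0) else total) 0])
    = (fun lR i => lR ++ [if resp.getD i 0 = 0 then (-1 : Int)
        else (List.range resp.length).foldl (fun total j =>
          if resp.getD j 0 ≠ 0 then total + ((links.getD j []).getD i 0) else total) 0]) := by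
    funext lR i
    split_ifs <;> rfl
  rw [hbody, PySem.List.foldl_append_singleton_eq_map, List.map_id']
  simp only [List.nil_append]
  apply List.map_congr_left
  intro i hi
  by_cases hz : resp.getD i 0 = 0
  · rw [if_pos hz, if_pos hz]
  · rw [if_neg hz, if_neg hz]
    have hiact : i ∈ (List.range resp.length).filter (fun j => resp.getD j 0 ≠ 0) :=
      List.mem_filter.mpr ⟨hi, by simpa using hz⟩
    have hne : pvRowsB links resp ≠ [] := by
      unfold pvRowsB
      simp only [ne_eq, List.map_eq_nil_iff]
      intro h; rw [h] at hiact; simp at hiact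
    have hlen : ∀ r ∈ pvRowsB links resp, i < r.length := by
      intro r hr
      rcases List.mem_map.mp hr with ⟨j, hj, rfl⟩
      have hjr := List.mem_filter.mp hj
      exact (hpre i hi hz j hjr.1 (by simpa using hjr.2)).2
    have hihead : i < ((pvRowsB links resp).headD []).length := by
      cases hrows : pvRowsB links resp with
      | nil => exact absurd hrows hne
      | cons r t =>
          have : r ∈ pvRowsB links resp := by rw [hrows]; simp
          simpa using hlen r this
    rw [foldl_if_filter (fun j => resp.getD j 0 ≠ 0)
          (fun j => (links.getD j []).getD i 0), PySem.List.foldl_add]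
    simp only [zero_add]
    rw [getD_map_sum, pvZipStar,
        pvZipStarGo_getD _ (pvRowsB links resp) i hihead hne hlen]
    unfold pvRowsB
    rw [List.map_map]
    rfl
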